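-- pv_equiv track=rewrite | github.com/zalf-rpm/capnp-stub-generator | tests/test_advanced_generics_anypointer_interface.py | _class_block_contains_any
-- ===== SOURCE A (Python) =====
-- def _class_block_contains_any(lines: list[str], class_name: str, field_tokens: tuple[str, ...]) -> bool:
--     """Return whether a class block contains any of the expected field tokens."""
--     in_class = False
--     for line in lines:
--         if f"class {class_name}" in line:
--             in_class = True
--         elif in_class and "class " in line and class_name not in line:
--             in_class = False
--
--         if in_class and any(token in line for token in field_tokens):
--             return True
--     return False
-- ===== SOURCE B (Python) =====
-- def _class_block_contains_any(lines: list[str], class_name: str, field_tokens: tuple[str, ...]) -> bool: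
--     """Event-index re-implementation: collect the positions of all 'class' events
--     (target header -> True, other class line -> False), then for each line that
--     contains a field token, binary-search the last event at or before it; the line
--     is inside the target block iff that event is a target header."""
--     start = "class " + class_name
--     events = []
--     for i, line in enumerate(lines):
--         if start in line:
--             events.append((i, True))
--         elif "class " in line and class_name not in line:
--             events.append((i, False))
--
--     def in_block(i: int) -> bool:
--         lo, hi = 0, len(events)
--         while lo < hi:
--             mid = (lo + hi) // 2
--             if events[mid][0] <= i:
--                 lo = mid + 1
--             else:
--                 hi = mid
--         return lo > 0 and events[lo - 1][1]
--
--     return any(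
--         any(tok in line for tok in field_tokens) and in_block(i)
--         for i, line in enumerate(lines)
--     )
-- ===== Notes on version B (the rewrite author's own statement) =====
-- stated objective: alternative
-- what changed: B drops A's forward in_class state machine: it first builds an index of all 'class' event positions (target header vs other class line), then decides each token-hit line independently by binary-searching the last event at or before it.
import Mathlib
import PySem

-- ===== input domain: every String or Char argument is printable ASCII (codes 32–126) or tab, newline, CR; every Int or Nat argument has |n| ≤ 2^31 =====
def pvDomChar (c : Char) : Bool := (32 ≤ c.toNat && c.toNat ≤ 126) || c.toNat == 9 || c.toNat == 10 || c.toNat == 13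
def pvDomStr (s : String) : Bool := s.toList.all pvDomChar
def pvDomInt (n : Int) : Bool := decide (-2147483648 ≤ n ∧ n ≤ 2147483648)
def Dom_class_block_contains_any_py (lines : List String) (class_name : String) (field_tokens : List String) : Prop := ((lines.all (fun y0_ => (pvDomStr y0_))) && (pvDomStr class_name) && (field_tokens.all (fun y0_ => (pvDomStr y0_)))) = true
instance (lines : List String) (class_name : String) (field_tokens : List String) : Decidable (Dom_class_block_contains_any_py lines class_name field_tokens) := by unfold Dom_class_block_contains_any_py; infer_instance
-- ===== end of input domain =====

-- B replaces A's forward in_class state machine by an event index: it collects the positions of all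
-- 'class' events once, then binary-searches the last event at or before each token-hit line —
-- objective: alternative algorithm, same result.

-- ===== PORT A =====
-- A's per-line state update (the if/elif toggle of in_class).
def pvStep (class_name : String) (in_class : Bool) (line : String) : Bool :=
  if PySem.Str.isIn ("class " ++ class_name) line then true
  else if in_class && PySem.Str.isIn "class " line && !(PySem.Str.isIn class_name line) then false
  else in_class

-- A: one fused loop; toggles in_class, then checks the current line and returns early on a hit.
def classBlockLoopA (class_name : String) (field_tokens : List String) : List String → Bool → Bool
  | [], _ => false
  | line :: rest, in_class =>
    let in_class' := pvStep class_name in_class line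
    if in_class' && field_tokens.any (fun token => PySem.Str.isIn token line) then true
    else classBlockLoopA class_name field_tokens rest in_class'

def class_block_contains_any_py (lines : List String) (class_name : String) (field_tokens : List String) : Bool :=
  classBlockLoopA class_name field_tokens lines false

-- ===== PORT B =====
-- B pass 1 (Python's `for i, line in enumerate(lines): … events.append …`):
-- the list of 'class' events, (index, is-target-header), in increasing index order.
def pvEventsAux (class_name : String) : List String → Nat → List (Nat × Bool)
  | [], _ => []
  | l :: rest, i =>
    (if PySem.Str.isIn ("class " ++ class_name) l then [(i, true)]
     else if PySem.Str.isIn "class " l && !(PySem.Str.isIn class_name l) then [(i, false)]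
     else []) ++ pvEventsAux class_name rest (i + 1)

-- Python's hand-written `while lo < hi` binary search (number of events with index ≤ i).
def pvBSearch (events : List (Nat × Bool)) (i : Nat) (lo hi : Nat) : Nat :=
  if lo < hi then
    let mid := (lo + hi) / 2
    if (events.getD mid (0, false)).1 ≤ i then pvBSearch events i (mid + 1) hi
    else pvBSearch events i lo mid
  else lo
termination_by hi - lo
decreasing_by all_goals omega

-- Python's in_block(i): `return lo > 0 and events[lo - 1][1]`.
def pvInBlock (events : List (Nat × Bool)) (i : Nat) : Bool :=
  let lo := pvBSearch events i 0 events.length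
  decide (0 < lo) && (events.getD (lo - 1) (0, false)).2

def class_block_contains_any_py_alt (lines : List String) (class_name : String) (field_tokens : List String) : Bool :=
  let events := pvEventsAux class_name lines 0
  (List.range lines.length).any (fun i =>
    field_tokens.any (fun tok => PySem.Str.isIn tok (lines.getD i "")) && pvInBlock events i)

-- ===== PRECONDITION & SPEC =====
def Spec_class_block_contains_any_py (lines : List String) (class_name : String) (field_tokens : List String) (out : Bool) : Prop := out = class_block_contains_any_py_alt lines class_name field_tokens
instance (lines : List String) (class_name : String) (field_tokens : List String) (out : Bool) : Decidable (Spec_class_block_contains_any_py lines class_name field_tokens out) := by unfold Spec_class_block_contains_any_py; infer_instance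

-- ===== CLAIM (what is proved, stated in full; the proofs are below) =====
def Claim_equal_class_block_contains_any_py : Prop := ∀ (lines : List String) (class_name : String) (field_tokens : List String), Dom_class_block_contains_any_py lines class_name field_tokens → Spec_class_block_contains_any_py lines class_name field_tokens (class_block_contains_any_py lines class_name field_tokens)

-- ===== LEMMAS AND PROOFS =====
-- The flag of the last event, with a fallback for "no event".
def pvLastFlag (evs : List (Nat × Bool)) (c : Bool) : Bool :=
  match evs.getLast? with
  | some e => e.2
  | none => c

-- A's state machine on a reversed-prefix scan, generalized over the start state.
def pvG (class_name : String) : List String → Bool → Bool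
  | [], c => c
  | l :: rest, c =>
    if PySem.Str.isIn ("class " ++ class_name) l then true
    else if PySem.Str.isIn "class " l && !(PySem.Str.isIn class_name l) then false
    else pvG class_name rest c

theorem pvG_append_single (cn : String) (l : List String) (x : String) (c : Bool) :
    pvG cn (l ++ [x]) c = pvG cn l (pvStep cn c x) := by
  induction l with
  | nil => cases c <;> simp [pvG, pvStep]
  | cons y ys ih => simp [pvG, ih]

theorem pvIfTrueElse (b e : Bool) : (if b = true then true else e) = (b || e) := by
  cases b <;> simp

-- A's fused loop equals "some line has a token hit while the state machine is on".
theorem loopA_eq (cn : String) (toks : List String) (lines : List String) (c : Bool) :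
    classBlockLoopA cn toks lines c =
      (List.range lines.length).any (fun i =>
        toks.any (fun tok => PySem.Str.isIn tok (lines.getD i "")) &&
          pvG cn ((lines.take (i + 1)).reverse) c) := by
  induction lines generalizing c with
  | nil => simp [classBlockLoopA]
  | cons x xs ih =>
    rw [classBlockLoopA]
    rw [pvIfTrueElse, ih (pvStep cn c x)]
    simp only [List.length_cons, List.range_succ_eq_map, List.any_cons, List.any_map,
      Function.comp_def, List.getD_cons_succ, List.getD_cons_zero, List.take_succ_cons,
      List.reverse_cons, pvG_append_single]
    simp [pvG, Bool.and_comm, Nat.succ_eq_add_one]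

theorem pvStep_lastFlag (cn : String) (c : Bool) (x : String) (s : Nat) :
    pvStep cn c x =
      pvLastFlag
        (if PySem.Str.isIn ("class " ++ cn) x then [(s, true)]
         else if PySem.Str.isIn "class " x && !(PySem.Str.isIn cn x) then [(s, false)]
         else []) c := by
  cases h1 : PySem.Str.isIn ("class " ++ cn) x <;>
    cases h2 : PySem.Str.isIn "class " x <;>
      cases h3 : PySem.Str.isIn cn x <;>
        cases c <;>
          simp only [pvStep, pvLastFlag, h1, h2, h3, Bool.and_true, Bool.and_false, Bool.not_true, Bool.not_false, reduceIte,
            List.getLast?] <;> rfl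

-- The reversed-prefix state machine is decided by the last event of the prefix.
theorem pvG_reverse_eq_lastFlag (cn : String) (p : List String) (c : Bool) (s : Nat) :
    pvG cn p.reverse c = pvLastFlag (pvEventsAux cn p s) c := by
  induction p generalizing c s with
  | nil => simp [pvG, pvEventsAux, pvLastFlag]
  | cons x rest ih =>
    rw [List.reverse_cons, pvG_append_single, ih (pvStep cn c x) (s + 1)]
    rw [pvEventsAux]
    cases hrest : pvEventsAux cn rest (s + 1) with
    | nil => simp [pvLastFlag, pvStep_lastFlag cn c x s]
    | cons e es =>
      simp only [pvLastFlag, List.getLast?_append_of_ne_nil _ (by simp : e :: es ≠ [])]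
      cases hl : (e :: es).getLast? with
      | none => simp [List.getLast?_eq_none_iff] at hl
      | some v => simp

theorem pvEventsAux_append (cn : String) (l1 l2 : List String) (s : Nat) :
    pvEventsAux cn (l1 ++ l2) s = pvEventsAux cn l1 s ++ pvEventsAux cn l2 (s + l1.length) := by
  induction l1 generalizing s with
  | nil => simp [pvEventsAux]
  | cons x xs ih => simp [pvEventsAux, ih, Nat.add_assoc, Nat.add_comm 1]

theorem pvEventsAux_bounds (cn : String) (l : List String) (s : Nat) :
    ∀ e ∈ pvEventsAux cn l s, s ≤ e.1 ∧ e.1 < s + l.length := by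
  induction l generalizing s with
  | nil => simp [pvEventsAux]
  | cons x xs ih =>
    intro e he
    rw [pvEventsAux] at he
    rcases List.mem_append.mp he with h | h
    · split_ifs at h <;> simp_all
    · have := ih (s + 1) e h
      simp only [List.length_cons]
      omega

-- Binary-search correctness: it returns k whenever indices < k are ≤ i and indices ≥ k are > i.
theorem pvBSearch_eq (events : List (Nat × Bool)) (i k : Nat)
    (h1 : ∀ j, j < k → (events.getD j (0, false)).1 ≤ i)
    (h2 : ∀ j, k ≤ j → j < events.length → i < (events.getD j (0, false)).1) :
    ∀ n lo hi, hi - lo ≤ n → lo ≤ k → k ≤ hi → hi ≤ events.length →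
      pvBSearch events i lo hi = k := by
  intro n
  induction n with
  | zero =>
    intro lo hi hn hlo hhi hlen
    rw [pvBSearch, if_neg (by omega)]
    omega
  | succ m ih =>
    intro lo hi hn hlo hhi hlen
    rw [pvBSearch]
    split_ifs with hlt
    · by_cases hc : (events.getD ((lo + hi) / 2) (0, false)).1 ≤ i
      · rw [if_pos hc]
        have hk : (lo + hi) / 2 + 1 ≤ k := by
          by_contra hcon
          exact absurd hc (by exact Nat.not_le.mpr (h2 _ (by omega) (by omega)))
        exact ih _ _ (by omega) hk hhi hlen
      · rw [if_neg hc]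
        have hk : k ≤ (lo + hi) / 2 := by
          by_contra hcon
          exact hc (h1 _ (by omega))
        exact ih _ _ (by omega) hlo hk (by omega)
    · omega

-- pvInBlock computes the last-event flag of the prefix, for indices in range.
theorem pvInBlock_eq_lastFlag (cn : String) (lines : List String) (i : Nat)
    (hi : i < lines.length) :
    pvInBlock (pvEventsAux cn lines 0) i =
      pvLastFlag (pvEventsAux cn (lines.take (i + 1)) 0) false := by
  have hlen1 : (lines.take (i + 1)).length = i + 1 := by
    simp [List.length_take]; omega
  have hE : pvEventsAux cn lines 0 =
      pvEventsAux cn (lines.take (i + 1)) 0 ++ pvEventsAux cn (lines.drop (i + 1)) (i + 1) := by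
    conv_lhs => rw [← List.take_append_drop (i + 1) lines]
    rw [pvEventsAux_append, hlen1, Nat.zero_add]
  set E1 := pvEventsAux cn (lines.take (i + 1)) 0 with hE1
  set E2 := pvEventsAux cn (lines.drop (i + 1)) (i + 1) with hE2
  have h1 : ∀ j, j < E1.length → ((E1 ++ E2).getD j (0, false)).1 ≤ i := by
    intro j hj
    rw [List.getD_append _ _ _ _ hj]
    have hm : E1.getD j (0, false) ∈ E1 := by
      rw [List.getD_eq_getElem _ _ hj]
      exact List.getElem_mem hj
    have := pvEventsAux_bounds cn (lines.take (i + 1)) 0 _ hm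
    omega
  have h2 : ∀ j, E1.length ≤ j → j < (E1 ++ E2).length →
      i < ((E1 ++ E2).getD j (0, false)).1 := by
    intro j hjl hju
    rw [List.getD_append_right _ _ _ _ hjl]
    have hj2 : j - E1.length < E2.length := by
      simp only [List.length_append] at hju
      omega
    have hm : E2.getD (j - E1.length) (0, false) ∈ E2 := by
      rw [List.getD_eq_getElem _ _ hj2]
      exact List.getElem_mem hj2
    have := pvEventsAux_bounds cn (lines.drop (i + 1)) (i + 1) _ hm
    omega
  have hbs : pvBSearch (E1 ++ E2) i 0 (E1 ++ E2).length = E1.length :=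
    pvBSearch_eq (E1 ++ E2) i E1.length h1 h2 (E1 ++ E2).length 0 _ (by omega)
      (by omega) (by simp) (by omega)
  rw [pvInBlock, hE, hbs]
  by_cases hk : E1.length = 0
  · have : E1 = [] := List.length_eq_zero_iff.mp hk
    simp [this, pvLastFlag]
  · have hklt : E1.length - 1 < E1.length := by omega
    rw [List.getD_append _ _ _ _ hklt]
    have hne : E1 ≠ [] := by
      intro h; rw [h] at hk; simp at hk
    rw [pvLastFlag, List.getLast?_eq_getElem?, List.getElem?_eq_getElem hklt,
      List.getD_eq_getElem _ _ hklt]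
    simp [Nat.pos_of_ne_zero hk]

-- range-any congruence helper
theorem pvAnyRangeCongr (n : Nat) (f g : Nat → Bool) (h : ∀ i, i < n → f i = g i) :
    (List.range n).any f = (List.range n).any g := by
  induction n with
  | zero => simp
  | succ m ih =>
    rw [List.range_succ]
    simp only [List.any_append, List.any_cons, List.any_nil]
    rw [ih (fun i him => h i (by omega)), h m (by omega)]

-- ===== VERDICT (by name: the statement is the Claim_ definition above) =====
theorem class_block_contains_any_py_spec : Claim_equal_class_block_contains_any_py := by
  intro lines cn toks _
  unfold Spec_class_block_contains_any_py class_block_contains_any_py class_block_contains_any_py_alt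
  rw [loopA_eq]
  apply pvAnyRangeCongr
  intro i hi
  rw [pvG_reverse_eq_lastFlag cn _ false 0, pvInBlock_eq_lastFlag cn lines i hi]
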